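-- pv_equiv track=rewrite | github.com/vupatel08/research-mcp-tool | utils.py | select_best_github_repo
-- ===== SOURCE A (Python) =====
-- def select_best_github_repo(github_links, context_keywords=None):
--     """Select the best GitHub repository from a list of GitHub URLs"""
--     if not github_links:
--         return None
--
--     if context_keywords is None:
--         context_keywords = []
--
--     # Score repositories based on various factors
--     scored_repos = []
--
--     for link in github_links:
--         if not link:
--             continue
--
--         score = 0
--         link_lower = link.lower()
--
--         # Skip user profiles (github.com/username without repo)
--         path_parts = link.split('github.com/')[-1].split('/')
--         if len(path_parts) < 2 or not path_parts[1]: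
--             continue  # Skip user profiles
--
--         # Skip issue/PR/wiki pages - prefer main repo
--         if any(x in link_lower for x in ['/issues', '/pull', '/wiki', '/releases', '/actions']):
--             score -= 10
--
--         # Prefer repositories that match context keywords
--         for keyword in context_keywords:
--             if keyword.lower() in link_lower:
--                 score += 20
--
--         # Prefer Microsoft/official org repos if in a Microsoft context
--         if 'microsoft' in link_lower and any(k.lower() in link_lower for k in context_keywords):
--             score += 15
--
--         # Prefer main branch/root repo URLs
--         if link_lower.endswith('.git') or '/tree/' not in link_lower:
--             score += 5
--
--         scored_repos.append((score, link))
--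
--     if scored_repos:
--         # Return the highest scored repository
--         scored_repos.sort(key=lambda x: x[0], reverse=True)
--         return scored_repos[0][1]
--
--     return None
-- ===== SOURCE B (Python) =====
-- def select_best_github_repo(github_links, context_keywords=None):
--     """Select the best GitHub repository from a list of GitHub URLs"""
--     keywords = [k.lower() for k in (context_keywords or [])]
--
--     def score(link):
--         """Score one URL, or None if it should be skipped (no repo path)."""
--         parts = link.split('github.com/')[-1].split('/')
--         if len(parts) < 2 or not parts[1]:
--             return None
--         low = link.lower()
--         return ((-10 if any(x in low for x in ('/issues', '/pull', '/wiki', '/releases', '/actions')) else 0)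
--                 + 20 * sum(1 for k in keywords if k in low)
--                 + (15 if 'microsoft' in low and any(k in low for k in keywords) else 0)
--                 + (5 if low.endswith('.git') or '/tree/' not in low else 0))
--
--     best_link, best_score = None, 0
--     for link in github_links:
--         s = score(link)
--         if s is None:
--             continue
--         if best_link is None or s > best_score:
--             best_link, best_score = link, s
--     return best_link
-- ===== Notes on version B (the rewrite author's own statement) =====
-- stated objective: simpler
-- what changed: Replaced the scored-list build plus reverse stable sort with a single pass keeping a running best (strict > so the first maximal link wins), factored the scoring into a pure helper that returns the score as one arithmetic sum (or None to skip), and lowercased the keywords once up front.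
import Mathlib
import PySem

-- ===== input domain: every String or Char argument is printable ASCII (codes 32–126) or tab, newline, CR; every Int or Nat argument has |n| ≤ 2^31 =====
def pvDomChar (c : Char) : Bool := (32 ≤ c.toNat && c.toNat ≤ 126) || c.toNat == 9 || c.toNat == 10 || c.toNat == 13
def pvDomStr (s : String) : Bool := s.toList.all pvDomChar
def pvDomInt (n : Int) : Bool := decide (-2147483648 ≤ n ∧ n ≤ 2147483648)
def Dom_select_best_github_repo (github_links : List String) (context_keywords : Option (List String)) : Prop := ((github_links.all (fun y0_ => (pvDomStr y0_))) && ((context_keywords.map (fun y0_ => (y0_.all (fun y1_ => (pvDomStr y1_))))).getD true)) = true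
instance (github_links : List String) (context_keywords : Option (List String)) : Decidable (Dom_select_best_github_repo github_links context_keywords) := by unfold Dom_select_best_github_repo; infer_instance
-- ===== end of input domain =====

-- B replaces A's scored-list build + reverse stable sort by a single pass with a running best
-- (strict >, so the first maximal link wins) and a pure scoring helper; return values only, no mutation.

-- ===== PORT A =====
def select_best_github_repo (github_links : List String) (context_keywords : Option (List String)) : Option String :=
  if github_links = [] then none
  else
    let ckw := context_keywords.getD []
    let scored := github_links.foldl (fun scored link =>
      if link = "" then scored
      else
        let score : Int := 0
        let link_lower := PySem.Str.lower link
        let path_parts := PySem.Chars.splitOn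
          (PySem.List.pyGetD (PySem.Chars.splitOn link.toList "github.com/".toList) (-1) [])
          "/".toList
        if path_parts.length < 2 ∨ PySem.List.pyGetD path_parts 1 [] = [] then scored
        else
          let score := if ["/issues", "/pull", "/wiki", "/releases", "/actions"].any
              (fun x => PySem.Str.isIn x link_lower) then score - 10 else score
          let score := ckw.foldl (fun score keyword =>
            if PySem.Str.isIn (PySem.Str.lower keyword) link_lower then score + 20 else score) score
          let score := if PySem.Str.isIn "microsoft" link_lower &&
              ckw.any (fun k => PySem.Str.isIn (PySem.Str.lower k) link_lower) then score + 15 else score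
          let score := if PySem.Str.endswith link_lower ".git" ||
              !(PySem.Str.isIn "/tree/" link_lower) then score + 5 else score
          scored ++ [(score, link)]) []
    if scored ≠ [] then ((PySem.List.sorted scored Prod.fst true).head?).map Prod.snd
    else none

-- ===== PORT B =====
-- score one URL, or none if it should be skipped (no repo path); keywords come pre-lowercased
def pvLinkScore (keywords : List String) (link : String) : Option Int :=
  let parts := PySem.Chars.splitOn
    (PySem.List.pyGetD (PySem.Chars.splitOn link.toList "github.com/".toList) (-1) [])
    "/".toList
  if parts.length < 2 ∨ PySem.List.pyGetD parts 1 [] = [] then none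
  else
    let low := PySem.Str.lower link
    some ((if ["/issues", "/pull", "/wiki", "/releases", "/actions"].any
          (fun x => PySem.Str.isIn x low) then (-10 : Int) else 0)
      + 20 * (keywords.countP (fun k => PySem.Str.isIn k low) : Int)
      + (if PySem.Str.isIn "microsoft" low && keywords.any (fun k => PySem.Str.isIn k low) then 15 else 0)
      + (if PySem.Str.endswith low ".git" || !(PySem.Str.isIn "/tree/" low) then 5 else 0))

def select_best_github_repo_alt (github_links : List String) (context_keywords : Option (List String)) : Option String :=
  let keywords := (context_keywords.getD []).map PySem.Str.lower
  (github_links.foldl (fun best link =>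
      match pvLinkScore keywords link with
      | none => best
      | some s =>
        match best with
        | none => some (link, s)
        | some (_, bs) => if bs < s then some (link, s) else best) none).map Prod.fst

-- ===== PRECONDITION & SPEC =====
def Spec_select_best_github_repo (github_links : List String) (context_keywords : Option (List String)) (out : Option String) : Prop := out = select_best_github_repo_alt github_links context_keywords
instance (github_links : List String) (context_keywords : Option (List String)) (out : Option String) : Decidable (Spec_select_best_github_repo github_links context_keywords out) := by unfold Spec_select_best_github_repo; infer_instance

-- ===== CLAIM (what is proved, stated in full; the proofs are below) =====
def Claim_equal_select_best_github_repo : Prop := ∀ (github_links : List String) (context_keywords : Option (List String)), Dom_select_best_github_repo github_links context_keywords → Spec_select_best_github_repo github_links context_keywords (select_best_github_repo github_links context_keywords)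

-- ===== LEMMAS AND PROOFS =====

-- A's per-link record, as a filterMap function
def pvLinkA (ckw : List String) (link : String) : Option (Int × String) :=
  if link = "" then none
  else
    let link_lower := PySem.Str.lower link
    let path_parts := PySem.Chars.splitOn
      (PySem.List.pyGetD (PySem.Chars.splitOn link.toList "github.com/".toList) (-1) [])
      "/".toList
    if path_parts.length < 2 ∨ PySem.List.pyGetD path_parts 1 [] = [] then none
    else
      let s0 : Int := 0
      let s1 := if ["/issues", "/pull", "/wiki", "/releases", "/actions"].any
          (fun x => PySem.Str.isIn x link_lower) then s0 - 10 else s0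
      let s2 := ckw.foldl (fun score keyword =>
        if PySem.Str.isIn (PySem.Str.lower keyword) link_lower then score + 20 else score) s1
      let s3 := if PySem.Str.isIn "microsoft" link_lower &&
          ckw.any (fun k => PySem.Str.isIn (PySem.Str.lower k) link_lower) then s2 + 15 else s2
      let s4 := if PySem.Str.endswith link_lower ".git" ||
          !(PySem.Str.isIn "/tree/" link_lower) then s3 + 5 else s3
      some (s4, link)

lemma pvFoldl_add_if {α : Type} (p : α → Bool) (l : List α) (a : Int) :
    List.foldl (fun acc x => if p x then acc + 20 else acc) a l = a + 20 * (l.countP p : Int) := by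
  induction l generalizing a with
  | nil => simp
  | cons x t ih =>
      simp only [List.foldl_cons, List.countP_cons]
      by_cases h : p x
      · simp only [h, if_true, ih]; push_cast; ring
      · simp [h, ih]

-- one step of A's loop, as an append of pvLinkA's optional record
lemma pvStep_eq (ckw : List String) (acc : List (Int × String)) (link : String) :
    (if link = "" then acc
     else
       let score : Int := 0
       let link_lower := PySem.Str.lower link
       let path_parts := PySem.Chars.splitOn
         (PySem.List.pyGetD (PySem.Chars.splitOn link.toList "github.com/".toList) (-1) [])
         "/".toList
       if path_parts.length < 2 ∨ PySem.List.pyGetD path_parts 1 [] = [] then acc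
       else
         let score := if ["/issues", "/pull", "/wiki", "/releases", "/actions"].any
             (fun x => PySem.Str.isIn x link_lower) then score - 10 else score
         let score := ckw.foldl (fun score keyword =>
           if PySem.Str.isIn (PySem.Str.lower keyword) link_lower then score + 20 else score) score
         let score := if PySem.Str.isIn "microsoft" link_lower &&
             ckw.any (fun k => PySem.Str.isIn (PySem.Str.lower k) link_lower) then score + 15 else score
         let score := if PySem.Str.endswith link_lower ".git" ||
             !(PySem.Str.isIn "/tree/" link_lower) then score + 5 else score
         acc ++ [(score, link)])
    = acc ++ (pvLinkA ckw link).toList := by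
  simp only [pvLinkA]
  by_cases h0 : link = ""
  · simp [h0]
  · simp only [h0, if_false]
    split_ifs with h1 <;> simp

-- A's loop builds exactly the filterMap of pvLinkA
lemma pvScoredA_eq (ckw : List String) (links : List String) (acc : List (Int × String)) :
    links.foldl (fun scored link =>
      if link = "" then scored
      else
        let score : Int := 0
        let link_lower := PySem.Str.lower link
        let path_parts := PySem.Chars.splitOn
          (PySem.List.pyGetD (PySem.Chars.splitOn link.toList "github.com/".toList) (-1) [])
          "/".toList
        if path_parts.length < 2 ∨ PySem.List.pyGetD path_parts 1 [] = [] then scored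
        else
          let score := if ["/issues", "/pull", "/wiki", "/releases", "/actions"].any
              (fun x => PySem.Str.isIn x link_lower) then score - 10 else score
          let score := ckw.foldl (fun score keyword =>
            if PySem.Str.isIn (PySem.Str.lower keyword) link_lower then score + 20 else score) score
          let score := if PySem.Str.isIn "microsoft" link_lower &&
              ckw.any (fun k => PySem.Str.isIn (PySem.Str.lower k) link_lower) then score + 15 else score
          let score := if PySem.Str.endswith link_lower ".git" ||
              !(PySem.Str.isIn "/tree/" link_lower) then score + 5 else score
          scored ++ [(score, link)]) acc
    = acc ++ links.filterMap (pvLinkA ckw) := by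
  induction links generalizing acc with
  | nil => simp
  | cons link t ih =>
      simp only [List.foldl_cons]
      rw [pvStep_eq ckw acc link, ih, List.filterMap_cons]
      cases pvLinkA ckw link <;> simp

-- per-link: pvLinkA is pvLinkScore with the score computed as one sum over pre-lowered keywords
lemma pvLinkA_eq_score (ckw : List String) (link : String) :
    pvLinkA ckw link = (pvLinkScore (ckw.map PySem.Str.lower) link).map (fun s => (s, link)) := by
  by_cases h0 : link = ""
  · subst h0; rfl
  · simp only [pvLinkA, pvLinkScore, h0, if_false]
    rw [pvFoldl_add_if]
    simp only [List.countP_map, List.any_map, Function.comp_def]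
    split_ifs <;> simp

-- head of insertBy (reverse order on fst): new head iff strictly larger key
lemma pvHead_insertBy (x : Int × String) (l : List (Int × String)) :
    (PySem.List.insertBy (fun a b => decide (b.1 < a.1)) x l).head?
      = some (match l.head? with
              | none => x
              | some m => if m.1 < x.1 then x else m) := by
  cases l with
  | nil => simp [PySem.List.insertBy]
  | cons y t =>
      simp only [PySem.List.insertBy, List.head?_cons]
      by_cases h : y.1 < x.1 <;> simp [h]

-- running the stable reverse insertion sort, the head is the first-max fold
lemma pvHead_foldl_insertBy (S : List (Int × String)) (acc : List (Int × String)) :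
    (S.foldl (fun acc x => PySem.List.insertBy (fun a b => decide (b.1 < a.1)) x acc) acc).head?
      = S.foldl (fun b x =>
          match b with
          | none => some x
          | some m => if m.1 < x.1 then some x else some m) acc.head? := by
  induction S generalizing acc with
  | nil => rfl
  | cons x t ih =>
      simp only [List.foldl_cons]
      rw [ih, pvHead_insertBy]
      cases acc.head? with
      | none => rfl
      | some m =>
          by_cases h : m.1 < x.1 <;> simp [h]

-- B's single pass over the links equals the first-max fold over A's scored list (keys swapped)
lemma pvBest_fold_eq (kws : List String) (links : List String) (b : Option (Int × String)) :
    links.foldl (fun best link =>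
      match pvLinkScore kws link with
      | none => best
      | some s =>
        match best with
        | none => some (link, s)
        | some (_, bs) => if bs < s then some (link, s) else best)
      (b.map (fun p => (p.2, p.1)))
    = ((links.filterMap (fun l => (pvLinkScore kws l).map (fun s => (s, l)))).foldl
        (fun b x =>
          match b with
          | none => some x
          | some m => if m.1 < x.1 then some x else some m) b).map (fun p => (p.2, p.1)) := by
  induction links generalizing b with
  | nil => simp
  | cons link t ih =>
      simp only [List.foldl_cons, List.filterMap_cons]
      cases pvLinkScore kws link with
      | none => simp [ih]
      | some s =>
          simp only [Option.map_some, List.foldl_cons]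
          cases b with
          | none => exact ih (some (s, link))
          | some m =>
              by_cases h : m.1 < s
              · simp only [Option.map_some, h, if_true]
                exact ih (some (s, link))
              · simp only [Option.map_some, h, if_false]
                exact ih (some m)

-- ===== VERDICT (by name: the statement is the Claim_ definition above) =====
theorem select_best_github_repo_spec : Claim_equal_select_best_github_repo := by
  intro github_links context_keywords _
  unfold Spec_select_best_github_repo
  unfold select_best_github_repo select_best_github_repo_alt
  simp only [pvScoredA_eq, List.nil_append]
  have hlinks : (github_links.filterMap (pvLinkA (context_keywords.getD [])))
      = github_links.filterMap (fun l =>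
          (pvLinkScore ((context_keywords.getD []).map PySem.Str.lower) l).map (fun s => (s, l))) := by
    apply List.filterMap_congr
    intro l _
    exact pvLinkA_eq_score _ l
  have hB := pvBest_fold_eq ((context_keywords.getD []).map PySem.Str.lower) github_links none
  simp only [Option.map_none] at hB
  rw [hB, ← hlinks]
  set S := github_links.filterMap (pvLinkA (context_keywords.getD [])) with hS
  by_cases hempty : github_links = []
  · subst hempty; rfl
  · simp only [hempty, if_false]
    by_cases hSnil : S = []
    · simp [hSnil]
    · simp only [hSnil, ne_eq, not_false_iff, if_true]
      rw [PySem.List.sorted_rev_eq_foldl_insertBy]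
      rw [pvHead_foldl_insertBy]
      simp only [Option.map_map]
      rfl
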